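-- pv_equiv track=rewrite | github.com/dongeui/photome | app/services/metadata/service.py | _parse_sips_dimensions
-- ===== SOURCE A (Python) =====
-- from typing import Any, Mapping, Sequence
--
-- def _parse_sips_dimensions(stdout: str) -> tuple[int | None, int | None]:
--     width = height = None
--     for line in stdout.splitlines():
--         stripped = line.strip()
--         if ":" not in stripped:
--             continue
--         key, raw_value = [part.strip() for part in stripped.split(":", 1)]
--         if key == "pixelWidth":
--             width = _parse_int(raw_value)
--         elif key == "pixelHeight":
--             height = _parse_int(raw_value)
--     return width, height
--
-- def _parse_int(value: Any) -> int | None: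
--     if value is None:
--         return None
--     try:
--         return int(str(value).strip())
--     except (TypeError, ValueError):
--         return None
-- ===== SOURCE B (Python) =====
-- def _parse_sips_dimensions(stdout):
--     lines = stdout.splitlines()
--     return _last_value(lines, "pixelWidth"), _last_value(lines, "pixelHeight")
--
-- def _last_value(lines, key):
--     # backward search with early exit: the first match from the end is A's last-wins value
--     for line in reversed(lines):
--         head, sep, tail = line.strip().partition(":")
--         if sep and head.strip() == key:
--             return _parse_int(tail.strip())
--     return None
--
-- def _parse_int(value):
--     if value is None:
--         return None
--     try:
--         return int(str(value).strip())
--     except (TypeError, ValueError):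
--         return None
-- ===== Notes on version B (the rewrite author's own statement) =====
-- stated objective: alternative
-- what changed: B replaces A's single forward pass that dispatches every colon line onto two mutable accumulators with two independent backward searches: for each key it scans the lines in reverse and returns the parsed value of the first match found (Python's last-wins line), exiting early.
import Mathlib
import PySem

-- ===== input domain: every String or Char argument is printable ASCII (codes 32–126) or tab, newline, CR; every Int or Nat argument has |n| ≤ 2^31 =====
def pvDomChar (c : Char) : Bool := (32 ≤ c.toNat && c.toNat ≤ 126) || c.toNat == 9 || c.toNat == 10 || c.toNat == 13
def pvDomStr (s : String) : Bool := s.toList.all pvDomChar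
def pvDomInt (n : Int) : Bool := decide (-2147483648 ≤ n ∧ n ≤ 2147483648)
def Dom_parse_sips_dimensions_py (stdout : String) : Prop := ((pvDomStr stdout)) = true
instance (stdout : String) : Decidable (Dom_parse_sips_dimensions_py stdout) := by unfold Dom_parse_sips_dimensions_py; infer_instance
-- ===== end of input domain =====

-- B replaces A's single forward pass updating two accumulators with two independent
-- backward searches with early exit (first match from the end = A's last-wins value).

-- ===== PORT A =====
-- _parse_int applied to a str value: int(str(value).strip())
def pvParseIntA (v : String) : Option Int :=
  PySem.Int.ofStr? (PySem.Str.strip v)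

-- loop body of A: dispatch on the stripped key, update width/height in place
def pvStepA (st : Option Int × Option Int) (line : String) : Option Int × Option Int :=
  if PySem.Str.isIn ":" (PySem.Str.strip line) then
    match PySem.Str.splitMax? (PySem.Str.strip line) ":" 1 with
    | some [key, rawValue] =>
        if PySem.Str.strip key = "pixelWidth" then (pvParseIntA (PySem.Str.strip rawValue), st.2)
        else if PySem.Str.strip key = "pixelHeight" then (st.1, pvParseIntA (PySem.Str.strip rawValue))
        else st
    | _ => st  -- unreachable totality guard: split(":",1) with ":" present gives 2 parts
  else st

def parse_sips_dimensions_py (stdout : String) : Option Int × Option Int :=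
  (PySem.Str.splitlines stdout).foldl pvStepA (none, none)

-- ===== PORT B =====
-- one reversed-loop iteration: head, sep, tail = line.strip().partition(":");
-- partition is ported exactly via isIn (sep nonempty ⇔ ":" in s) + split(":", 1);
-- some v = the loop returns v here (early exit), none = keep scanning
def pvCheckLine (key line : String) : Option (Option Int) :=
  if PySem.Str.isIn ":" (PySem.Str.strip line) then
    match PySem.Str.splitMax? (PySem.Str.strip line) ":" 1 with
    | some [head, tail] =>
        if PySem.Str.strip head = key then
          some (PySem.Int.ofStr? (PySem.Str.strip (PySem.Str.strip tail)))  -- _parse_int(tail.strip())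
        else none
    | _ => none  -- unreachable totality guard
  else none

-- the 'for line in reversed(lines): … return …' loop, as structural recursion
def pvLastValueGo (key : String) : List String → Option Int
  | [] => none
  | l :: rest =>
    match pvCheckLine key l with
    | some v => v
    | none => pvLastValueGo key rest

def pvLastValue (lines : List String) (key : String) : Option Int :=
  pvLastValueGo key lines.reverse

def parse_sips_dimensions_py_alt (stdout : String) : Option Int × Option Int :=
  let lines := PySem.Str.splitlines stdout
  (pvLastValue lines "pixelWidth", pvLastValue lines "pixelHeight")

-- ===== PRECONDITION & SPEC =====
def Spec_parse_sips_dimensions_py (stdout : String) (out : Option Int × Option Int) : Prop := out = parse_sips_dimensions_py_alt stdout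
instance (stdout : String) (out : Option Int × Option Int) : Decidable (Spec_parse_sips_dimensions_py stdout out) := by unfold Spec_parse_sips_dimensions_py; infer_instance

-- ===== CLAIM =====
def Claim_equal_parse_sips_dimensions_py : Prop := ∀ (stdout : String), Dom_parse_sips_dimensions_py stdout → Spec_parse_sips_dimensions_py stdout (parse_sips_dimensions_py stdout)

-- ===== LEMMAS AND PROOFS =====

-- proof-only helper: forward search for the first matching line, keeping the
-- found/not-found distinction (some v = matched with parse result v)
def pvFindK (key : String) : List String → Option (Option Int)
  | [] => none
  | l :: rest => (pvCheckLine key l).orElse (fun _ => pvFindK key rest)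

theorem pv_go_eq_find (key : String) (xs : List String) :
    pvLastValueGo key xs = (pvFindK key xs).getD none := by
  induction xs with
  | nil => rfl
  | cons l rest ih =>
    simp only [pvLastValueGo, pvFindK]
    cases pvCheckLine key l <;> simp [ih, Option.orElse]

theorem pv_find_append (key : String) (xs ys : List String) :
    pvFindK key (xs ++ ys) = (pvFindK key xs).orElse (fun _ => pvFindK key ys) := by
  induction xs with
  | nil => simp [pvFindK, Option.orElse]
  | cons l rest ih =>
    simp only [List.cons_append, pvFindK, ih]
    cases pvCheckLine key l <;> simp [Option.orElse]

-- per-line agreement: A's step on one line vs B's check of that line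
set_option maxHeartbeats 2000000 in
theorem pv_step_check (st : Option Int × Option Int) (l : String) :
    (pvStepA st l).1 = (pvCheckLine "pixelWidth" l).getD st.1 ∧
    (pvStepA st l).2 = (pvCheckLine "pixelHeight" l).getD st.2 := by
  simp only [pvStepA, pvCheckLine]
  generalize PySem.Str.strip l = s
  generalize PySem.Str.splitMax? s ":" 1 = r
  split_ifs with hin
  · rcases r with _ | ⟨_ | ⟨key, _ | ⟨val, _ | _⟩⟩⟩ <;> try exact ⟨rfl, rfl⟩
    by_cases hk : PySem.Str.strip key = "pixelWidth"
    · simp [hk, pvParseIntA]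
    · by_cases hk2 : PySem.Str.strip key = "pixelHeight"
      · simp [hk2, pvParseIntA]
      · simp [hk, hk2]
  · exact ⟨rfl, rfl⟩

-- loop invariant: folding A's step equals B's backward search with the start
-- state as the not-found default
theorem pv_fold_eq_find (lines : List String) (st : Option Int × Option Int) :
    (lines.foldl pvStepA st).1 = (pvFindK "pixelWidth" lines.reverse).getD st.1 ∧
    (lines.foldl pvStepA st).2 = (pvFindK "pixelHeight" lines.reverse).getD st.2 := by
  induction lines generalizing st with
  | nil => exact ⟨rfl, rfl⟩
  | cons l rest ih =>
    simp only [List.foldl_cons, List.reverse_cons, pv_find_append]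
    obtain ⟨ih1, ih2⟩ := ih (pvStepA st l)
    obtain ⟨h1, h2⟩ := pv_step_check st l
    constructor
    · rw [ih1, h1]
      cases pvFindK "pixelWidth" rest.reverse <;>
        simp [Option.orElse, pvFindK] <;> cases pvCheckLine "pixelWidth" l <;> simp
    · rw [ih2, h2]
      cases pvFindK "pixelHeight" rest.reverse <;>
        simp [Option.orElse, pvFindK] <;> cases pvCheckLine "pixelHeight" l <;> simp

-- ===== VERDICT =====
theorem parse_sips_dimensions_py_spec : Claim_equal_parse_sips_dimensions_py := by
  intro stdout _
  unfold Spec_parse_sips_dimensions_py parse_sips_dimensions_py parse_sips_dimensions_py_alt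
  obtain ⟨h1, h2⟩ := pv_fold_eq_find (PySem.Str.splitlines stdout) (none, none)
  simp only [pvLastValue, pv_go_eq_find]
  exact Prod.ext h1 h2
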